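-- pv_equiv track=rewrite | github.com/grigoryevaelizaveta/nt_performance_lab_tz | task1/task1.py | circular_path
-- ===== SOURCE A (Python) =====
-- def circular_path(n, m):
--
--     path = ""
--     current_index = 0
--     visited = [False] * n
--     for _ in range(n):
--         if visited[current_index]:
--             break
--         path += str(current_index + 1)
--         visited[current_index] = True
--         current_index = (current_index + m - 1) % n
--     return path
-- ===== SOURCE B (Python) =====
-- def circular_path(n, m):
--     # Closed form instead of simulation: the walk visits exactly the positions
--     # k*s % n for k = 0..c-1, where s = (m-1) % n and the cycle length is
--     # c = n // gcd(n, s); no visited array and no step-by-step walk.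
--     if n <= 0:
--         return ""
--     s = (m - 1) % n
--     a, b = n, s
--     while b:
--         a, b = b, a % b
--     c = n // a
--     return "".join(str(k * s % n + 1) for k in range(c))
-- ===== Notes on version B (the rewrite author's own statement) =====
-- stated objective: alternative
-- what changed: Replaces A's step-by-step walk with a visited array by a number-theoretic closed form: the visited positions are exactly k*s % n for k < c with s = (m-1) % n and cycle length c = n // gcd(n, s), computed by a Euclid gcd and a single comprehension (no simulation, no visited array).
import Mathlib
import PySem

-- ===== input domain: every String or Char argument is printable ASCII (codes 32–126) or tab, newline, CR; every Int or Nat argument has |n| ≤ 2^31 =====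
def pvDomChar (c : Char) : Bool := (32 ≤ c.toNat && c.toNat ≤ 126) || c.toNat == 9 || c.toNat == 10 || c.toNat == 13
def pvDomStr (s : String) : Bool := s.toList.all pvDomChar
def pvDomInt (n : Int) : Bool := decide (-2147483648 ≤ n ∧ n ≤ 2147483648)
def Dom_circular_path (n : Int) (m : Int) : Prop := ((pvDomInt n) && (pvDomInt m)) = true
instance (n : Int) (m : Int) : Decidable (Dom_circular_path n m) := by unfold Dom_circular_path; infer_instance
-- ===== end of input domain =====

-- B replaces A's step-by-step walk with a visited array by a number-theoretic closed form:
-- the visited positions are k*s % n for k < c, s = (m-1) % n, c = n // gcd(n, s) (alternative).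


-- ===== PORT A =====
-- the for-loop over range(n) with its break; fuel = number of remaining iterations;
-- visited[current_index] read/write is always in range when the line executes, so pyGetD/pySetD are exact there
def circular_path_loopA (n m : Int) : Nat → String → Int → List Bool → String
  | 0, path, _, _ => path
  | f + 1, path, cur, visited =>
    if PySem.List.pyGetD visited cur false then path
    else
      circular_path_loopA n m f (path ++ PySem.Int.toStr (cur + 1))
        (PySem.Int.mod (cur + m - 1) n) (PySem.List.pySetD visited cur true)

def circular_path (n : Int) (m : Int) : String :=
  circular_path_loopA n m n.toNat "" 0 (List.replicate n.toNat false)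

-- ===== PORT B =====
-- the `while b:` Euclid loop of Source B; b strictly decreases and stays < initial b, so fuel b.toNat + 1 is enough
def circular_path_gcdLoop : Nat → Int → Int → Int
  | 0, a, _ => a
  | f + 1, a, b => if b = 0 then a else circular_path_gcdLoop f b (PySem.Int.mod a b)

def circular_path_alt (n : Int) (m : Int) : String :=
  if n ≤ 0 then "" else
    let s := PySem.Int.mod (m - 1) n
    let g := circular_path_gcdLoop (s.toNat + 1) n s
    let c := PySem.Int.floordiv n g
    PySem.Str.join ""
      ((PySem.List.pyRange 0 c 1).map (fun k => PySem.Int.toStr (PySem.Int.mod (k * s) n + 1)))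

-- ===== PRECONDITION & SPEC =====
def Spec_circular_path (n : Int) (m : Int) (out : String) : Prop := out = circular_path_alt n m
instance (n : Int) (m : Int) (out : String) : Decidable (Spec_circular_path n m out) := by unfold Spec_circular_path; infer_instance

-- ===== CLAIM (what is proved, stated in full; the proofs are below) =====
def Claim_equal_circular_path : Prop := ∀ (n : Int) (m : Int), Dom_circular_path n m → Spec_circular_path n m (circular_path n m)

-- ===== LEMMAS AND PROOFS =====
def stepSeq (n m : Int) : Nat → Int
  | 0 => 0
  | k + 1 => PySem.Int.mod (stepSeq n m k + m - 1) n

lemma stepSeq_closed (n m : Int) (hn : 0 < n) : ∀ k, stepSeq n m k = ((k : Int) * (m - 1)) % n := by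
  intro k
  induction k with
  | zero => simp [stepSeq]
  | succ k ih =>
    rw [stepSeq, ih, PySem.Int.mod_eq_emod_of_pos hn,
        show ((k:Int)*(m-1) % n + m - 1 : Int) = (k:Int)*(m-1) % n + (m-1) by ring,
        Int.emod_add_emod]
    congr 1
    push_cast
    ring

lemma stepSeq_bounds (n m : Int) (hn : 0 < n) (k : Nat) :
    0 ≤ stepSeq n m k ∧ stepSeq n m k < n := by
  cases k with
  | zero => exact ⟨le_refl 0, hn⟩
  | succ k => exact ⟨PySem.Int.mod_nonneg _ hn, PySem.Int.mod_lt _ hn⟩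

lemma stepSeq_eq_zero_iff (n m : Int) (hn : 0 < n) (k : Nat) :
    stepSeq n m k = 0 ↔ n ∣ (k : Int) * (m - 1) := by
  rw [stepSeq_closed n m hn k]
  exact PySem.Int.emod_eq_zero_iff_dvd _ _

lemma stepSeq_inj (n m : Int) (hn : 0 < n) (c : Nat)
    (hmin : ∀ j, 0 < j → j < c → ¬ n ∣ (j : Int) * (m - 1))
    {i j : Nat} (hij : i < j) (hjc : j < c) (h : stepSeq n m i = stepSeq n m j) : False := by
  rw [stepSeq_closed n m hn, stepSeq_closed n m hn] at h
  have hd : n ∣ ((j : Int) - (i : Int)) * (m - 1) := by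
    have := Int.emod_eq_emod_iff_emod_sub_eq_zero.mp h.symm
    rw [show (j:Int) * (m-1) - (i:Int) * (m-1) = ((j:Int) - (i:Int)) * (m-1) by ring] at this
    exact (PySem.Int.emod_eq_zero_iff_dvd _ _).mp this
  have hji : ((j - i : Nat) : Int) = (j : Int) - (i : Int) := by
    push_cast [Nat.cast_sub hij.le]; ring
  exact hmin (j - i) (by omega) (by omega) (by rw [hji]; exact hd)

def visArr (n m : Int) (k : Nat) : List Bool :=
  (List.range n.toNat).map (fun j => (List.range k).any (fun i => (stepSeq n m i).toNat == j))

lemma visArr_zero (n m : Int) : visArr n m 0 = List.replicate n.toNat false := by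
  simp [visArr, List.map_const']

lemma visArr_read (n m : Int) (hn : 0 < n) (k : Nat) :
    PySem.List.pyGetD (visArr n m k) (stepSeq n m k) false
      = (List.range k).any (fun i => (stepSeq n m i).toNat == (stepSeq n m k).toNat) := by
  obtain ⟨h0, h1⟩ := stepSeq_bounds n m hn k
  have hlen : (visArr n m k).length = n.toNat := by simp [visArr]
  rw [PySem.List.pyGetD_eq_getElem _ _ h0 (by rw [hlen]; omega)]
  show (visArr n m k)[(stepSeq n m k).toNat]'(by rw [hlen]; omega) = _
  simp [visArr]

lemma visArr_write (n m : Int) (hn : 0 < n) (k : Nat) :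
    PySem.List.pySetD (visArr n m k) (stepSeq n m k) true = visArr n m (k + 1) := by
  obtain ⟨h0, h1⟩ := stepSeq_bounds n m hn k
  rw [PySem.List.pySetD_of_nonneg _ _ h0]
  apply List.ext_getElem
  · simp [visArr]
  · intro j hj hj'
    have hjN : j < n.toNat := by simpa [visArr] using hj'
    rw [List.getElem_set]
    simp only [visArr, List.getElem_map, List.getElem_range, List.range_succ, List.any_append,
      List.any_cons, List.any_nil]
    by_cases hcase : (stepSeq n m k).toNat = j
    · simp [hcase]
    · simp [hcase]

def tailStr (n m : Int) : Nat → Nat → String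
  | 0, _ => ""
  | d + 1, k => PySem.Int.toStr (stepSeq n m k + 1) ++ tailStr n m d (k + 1)

lemma loopA_run (n m : Int) (hn : 0 < n) (c : Nat)
    (hc : n ∣ (c : Int) * (m - 1)) (hc0 : 0 < c)
    (hmin : ∀ j, 0 < j → j < c → ¬ n ∣ (j : Int) * (m - 1)) (hcN : c ≤ n.toNat) :
    ∀ d k path, c - k = d → k ≤ c →
      circular_path_loopA n m (n.toNat - k) path (stepSeq n m k) (visArr n m k)
        = path ++ tailStr n m d k := by
  intro d
  induction d with
  | zero =>
    intro k path hd hk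
    have hkc : k = c := by omega
    subst hkc
    have hzc : stepSeq n m k = 0 := (stepSeq_eq_zero_iff n m hn k).mpr hc
    by_cases hcn : k = n.toNat
    · subst hcn
      simp [circular_path_loopA, tailStr]
    · obtain ⟨f, hf⟩ : ∃ f, n.toNat - k = f + 1 := ⟨n.toNat - k - 1, by omega⟩
      rw [hf]
      simp only [circular_path_loopA, visArr_read n m hn k]
      have hany : (List.range k).any (fun i => (stepSeq n m i).toNat == (stepSeq n m k).toNat) = true := by
        refine List.any_eq_true.mpr ⟨0, List.mem_range.mpr hc0, ?_⟩
        simp [stepSeq, hzc]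
      rw [hany]
      simp [tailStr]
  | succ d ih =>
    intro k path hd hk
    have hkc : k < c := by omega
    obtain ⟨f, hf⟩ : ∃ f, n.toNat - k = f + 1 := ⟨n.toNat - k - 1, by omega⟩
    rw [hf]
    simp only [circular_path_loopA, visArr_read n m hn k]
    have hany : (List.range k).any (fun i => (stepSeq n m i).toNat == (stepSeq n m k).toNat) = false := by
      refine List.any_eq_false.mpr ?_
      intro i hi htn
      have ht : (stepSeq n m i).toNat = (stepSeq n m k).toNat := by simpa using htn
      have hi' : i < k := List.mem_range.mp hi
      have heq : stepSeq n m i = stepSeq n m k := by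
        have b1 := (stepSeq_bounds n m hn i).1
        have b2 := (stepSeq_bounds n m hn k).1
        omega
      exact absurd heq (fun h => stepSeq_inj n m hn c hmin hi' hkc h)
    rw [hany]
    simp only [Bool.false_eq_true, if_false]
    rw [show PySem.Int.mod (stepSeq n m k + m - 1) n = stepSeq n m (k + 1) from rfl,
        visArr_write n m hn k,
        show f = n.toNat - (k + 1) by omega,
        ih (k + 1) (path ++ PySem.Int.toStr (stepSeq n m k + 1)) (by omega) (by omega)]
    rw [show tailStr n m (d+1) k = PySem.Int.toStr (stepSeq n m k + 1) ++ tailStr n m d (k+1) from rfl,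
        ← String.append_assoc]

-- the Euclid loop computes gcd (operands nonnegative, fuel exceeds b)
lemma gcdLoop_eq_gcd : ∀ (f : Nat) (a b : Int), 0 ≤ a → 0 ≤ b → b.toNat < f →
    circular_path_gcdLoop f a b = (Int.gcd a b : Int) := by
  intro f
  induction f using Nat.strong_induction_on with
  | _ f ih =>
    intro a b ha hb hf
    cases f with
    | zero => omega
    | succ f' =>
      rw [circular_path_gcdLoop]
      by_cases hb0 : b = 0
      · subst hb0
        simp [Int.gcd, Int.natAbs_of_nonneg ha]
      · rw [if_neg hb0]
        have hbpos : 0 < b := lt_of_le_of_ne hb (Ne.symm hb0)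
        have hmod : PySem.Int.mod a b = a % b := PySem.Int.mod_eq_emod_of_pos hbpos
        have h1 : 0 ≤ a % b := Int.emod_nonneg a hb0
        have h2 : a % b < b := Int.emod_lt_of_pos a hbpos
        rw [hmod, ih f' (by omega) b (a % b) hb h1 (by omega),
            Int.gcd_comm b (a % b), Int.gcd_emod]

-- N ∣ k*S ↔ (N / gcd N S) ∣ k  (the cycle-length characterisation)
lemma dvd_mul_iff_cycle (N S k : Nat) (hN : 0 < N) :
    N ∣ k * S ↔ (N / Nat.gcd N S) ∣ k := by
  set g := Nat.gcd N S with hg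
  have hgpos : 0 < g := Nat.gcd_pos_of_pos_left S hN
  have hgN : g ∣ N := Nat.gcd_dvd_left N S
  have hgS : g ∣ S := Nat.gcd_dvd_right N S
  obtain ⟨N', hN'⟩ := hgN
  obtain ⟨S', hS'⟩ := hgS
  have hcop : Nat.Coprime N' S' := by
    have := Nat.coprime_div_gcd_div_gcd (m := N) (n := S) hgpos
    rwa [← hg, hN', hS', Nat.mul_div_cancel_left _ hgpos, Nat.mul_div_cancel_left _ hgpos] at this
  have hdivN : N / g = N' := by rw [hN', Nat.mul_div_cancel_left _ hgpos]
  rw [hdivN]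
  constructor
  · intro h
    rw [hN', hS'] at h
    have h' : N' ∣ k * S' := by
      have : g * N' ∣ g * (k * S') := by
        rw [show g * (k * S') = k * (g * S') by ring]
        exact h
      exact (Nat.mul_dvd_mul_iff_left hgpos).mp this
    exact (Nat.Coprime.dvd_of_dvd_mul_right hcop) h'
  · intro h
    obtain ⟨t, ht⟩ := h
    rw [hN', hS', ht]
    exact ⟨t * S', by ring⟩

lemma intercalate_nil_eq_flatten (l : List (List Char)) : List.intercalate [] l = l.flatten := by
  induction l with
  | nil => rfl
  | cons a t ih => cases t <;> simp_all [List.intercalate, List.intersperse]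

lemma joinE_cons (a : String) (l : List String) :
    PySem.Str.join "" (a :: l) = a ++ PySem.Str.join "" l := by
  simp only [PySem.Str.join, PySem.Chars.join, String.toList_empty, intercalate_nil_eq_flatten,
    List.map_cons, List.flatten_cons]
  apply String.ext
  simp

-- B's joined comprehension, shifted by k0, equals A's tail string
lemma join_range_eq_tailStr (n m : Int) :
    ∀ d k0, PySem.Str.join ""
        ((List.range d).map (fun j => PySem.Int.toStr (stepSeq n m (k0 + j) + 1)))
      = tailStr n m d k0 := by
  intro d
  induction d with
  | zero => intro k0; rfl
  | succ d ih =>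
    intro k0
    rw [List.range_succ_eq_map, List.map_cons, List.map_map, joinE_cons, tailStr]
    congr 1
    · rw [← ih (k0 + 1)]
      congr 1
      apply List.map_congr_left
      intro j _
      simp only [Function.comp_apply]
      rw [show k0 + 1 + j = k0 + j.succ by omega]

-- ===== VERDICT (by name: the statement is the Claim_ definition above) =====
theorem circular_path_spec : Claim_equal_circular_path := by
  intro n m _
  unfold Spec_circular_path circular_path circular_path_alt
  by_cases hn : n ≤ 0
  · have h0 : n.toNat = 0 := by omega
    rw [if_pos hn, h0]
    rfl
  · rw [not_le] at hn
    rw [if_neg (by omega)]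
    show circular_path_loopA n m n.toNat "" 0 (List.replicate n.toNat false)
        = PySem.Str.join ""
            ((PySem.List.pyRange 0
                (PySem.Int.floordiv n
                  (circular_path_gcdLoop ((PySem.Int.mod (m - 1) n).toNat + 1) n
                    (PySem.Int.mod (m - 1) n))) 1).map
              (fun k => PySem.Int.toStr (PySem.Int.mod (k * PySem.Int.mod (m - 1) n) n + 1)))
    set s := PySem.Int.mod (m - 1) n with hs
    have hs0 : 0 ≤ s := PySem.Int.mod_nonneg _ hn
    have hsemod : s = (m - 1) % n := PySem.Int.mod_eq_emod_of_pos hn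
    set N := n.toNat with hN
    have hNn : ((N : Nat) : Int) = n := Int.toNat_of_nonneg hn.le
    have hNpos : 0 < N := by omega
    set S := s.toNat with hS
    have hSs : ((S : Nat) : Int) = s := Int.toNat_of_nonneg hs0
    set g := Nat.gcd N S with hg
    have hgpos : 0 < g := Nat.gcd_pos_of_pos_left S hNpos
    have hgN : g ∣ N := Nat.gcd_dvd_left N S
    set c := N / g with hc
    have hcpos : 0 < c := Nat.div_pos (Nat.le_of_dvd hNpos hgN) hgpos
    have hcN : c ≤ N := Nat.div_le_self N g
    -- the gcd loop computes g, and n // g = c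
    have hgl : circular_path_gcdLoop (S + 1) n s = (g : Int) := by
      rw [gcdLoop_eq_gcd (S + 1) n s hn.le hs0 (by omega)]
      have h1 : n.natAbs = n.toNat := by omega
      have h2 : s.natAbs = s.toNat := by omega
      rw [hg, hN, hS, Int.gcd, h1, h2]
    have hfd : PySem.Int.floordiv n (g : Int) = (c : Int) := by
      rw [PySem.Int.floordiv_eq_ediv_of_pos (by exact_mod_cast hgpos), ← hNn, hc]
      exact (Int.natCast_ediv N g).symm
    -- k*(m-1) and k*s agree mod n
    have hkmod : ∀ k : Int, k * (m - 1) % n = k * s % n := by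
      intro k
      rw [hsemod]
      conv_rhs => rw [Int.mul_emod, Int.emod_emod_of_dvd _ dvd_rfl, ← Int.mul_emod]
    -- divisibility bridge: n ∣ k*(m-1) ↔ N ∣ k*S ↔ c ∣ k
    have hbridge : ∀ k : Nat, (n ∣ (k : Int) * (m - 1)) ↔ c ∣ k := by
      intro k
      have h1 : n ∣ (k : Int) * (m - 1) ↔ n ∣ (k : Int) * s := by
        rw [← PySem.Int.emod_eq_zero_iff_dvd, ← PySem.Int.emod_eq_zero_iff_dvd, hkmod (k : Int)]
      rw [h1, ← hSs, ← hNn]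
      rw [show ((k : Nat) : Int) * ((S : Nat) : Int) = (((k * S : Nat) : Nat) : Int) by push_cast; ring]
      rw [Int.natCast_dvd_natCast, hc, hg]
      exact dvd_mul_iff_cycle N S k hNpos
    have hcdvd : n ∣ (c : Int) * (m - 1) := (hbridge c).mpr dvd_rfl
    have hmin : ∀ j, 0 < j → j < c → ¬ n ∣ (j : Int) * (m - 1) := by
      intro j hj hjc h
      have := Nat.le_of_dvd hj ((hbridge j).mp h)
      omega
    -- A's side
    have hA := loopA_run n m hn c hcdvd hcpos hmin (by omega) c 0 "" (by omega) (by omega)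
    rw [visArr_zero n m] at hA
    simp only [Nat.sub_zero, stepSeq] at hA
    rw [← hN] at hA
    rw [hA, hgl, hfd, PySem.List.pyRange_one, List.map_map]
    -- B's side: identify the mapped function with A's tail labels
    have hval : ∀ j : Nat, PySem.Int.mod ((j : Int) * s) n = stepSeq n m j := by
      intro j
      rw [stepSeq_closed n m hn j, PySem.Int.mod_eq_emod_of_pos hn, hkmod ((j : Int))]
    have hct : ((c : Int) - 0).toNat = c := by omega
    rw [hct]
    have hfun : ((fun k => PySem.Int.toStr (PySem.Int.mod (k * s) n + 1)) ∘
          (fun k : Nat => (0 : Int) + (k : Int)))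
        = fun j : Nat => PySem.Int.toStr (stepSeq n m (0 + j) + 1) := by
      funext j
      simp only [Function.comp_apply, zero_add]
      rw [hval j]
    rw [hfun, join_range_eq_tailStr n m c 0]
    simp
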